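-- pv_equiv track=rewrite | github.com/mohammedterryjack/algorithms | iteration_and_tabulation.py | create_word_with_substrings
-- ===== SOURCE A (Python) =====
-- from typing import List
--
-- def create_word_with_substrings(target_word:str, substrings:List[str]) -> List[str]:
--     target_index = len(target_word)
--     mex_offset = len(max(substrings,key=len))
--     memory = [None]*(target_index + mex_offset)
--     memory[0] = []
--     for index,character in enumerate(target_word):
--         if memory[index] is not None:
--             for substring in substrings:
--                 if substring.startswith(character):
--                     memory[index + len(substring)] = memory[index] + [substring]
--     return memory[target_index]
-- ===== SOURCE B (Python) =====
-- from typing import List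
--
-- def create_word_with_substrings(target_word: str, substrings: List[str]) -> List[str]:
--     # Back-pointer DP: store (parent position, substring) per position instead of
--     # copying the whole prefix list at every write; reconstruct the path once.
--     n = len(target_word)
--     parent = [None] * (n + 1)
--     for i in range(n):
--         if i == 0 or parent[i] is not None:
--             c = target_word[i]
--             for s in substrings:
--                 if s and s[0] == c:
--                     j = i + len(s)
--                     if j <= n:
--                         parent[j] = (i, s)
--     if n and parent[n] is None:
--         return None
--     path = []
--     j = n
--     while j:
--         i, s = parent[j]
--         path.append(s)
--         j = i
--     path.reverse()
--     return path
-- ===== Notes on version B (the rewrite author's own statement) =====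
-- stated objective: faster
-- what changed: A stores the whole substring sequence at every word position, copying an O(n)-long list at each DP write; B stores only a back-pointer (parent position, substring) per position and reconstructs the path once at the end.
import Mathlib
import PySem

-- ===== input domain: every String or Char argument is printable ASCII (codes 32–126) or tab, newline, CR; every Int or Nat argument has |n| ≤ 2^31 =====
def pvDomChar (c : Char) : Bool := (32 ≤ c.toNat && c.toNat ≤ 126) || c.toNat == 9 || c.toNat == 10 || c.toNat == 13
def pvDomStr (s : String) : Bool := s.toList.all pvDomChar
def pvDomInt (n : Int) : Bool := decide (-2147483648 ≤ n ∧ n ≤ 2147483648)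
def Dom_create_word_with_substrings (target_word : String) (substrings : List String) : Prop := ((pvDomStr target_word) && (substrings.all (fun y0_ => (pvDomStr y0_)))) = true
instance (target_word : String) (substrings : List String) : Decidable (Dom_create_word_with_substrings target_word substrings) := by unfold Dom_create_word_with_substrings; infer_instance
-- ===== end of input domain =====

-- B replaces A's per-write copy of the whole substring sequence by a back-pointer
-- table with a single path reconstruction at the end (asymptotically faster).


-- ===== PORT A =====
-- inner loop 'for substring in substrings: if substring.startswith(character): memory[index+len(substring)] = memory[index] + [substring]'
def pyA_inner (substrings : List String) (c : Char) (i : Nat)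
    (mem : List (Option (List String))) : List (Option (List String)) :=
  substrings.foldl (fun m s =>
    if PySem.Str.startswith s (String.ofList [c]) then
      m.set (i + s.toList.length) (some (((m.getD i none).getD []) ++ [s]))
    else m) mem

-- outer loop 'for index, character in enumerate(target_word): if memory[index] is not None: …'
def pyA_loop (substrings : List String) : List Char → Nat → List (Option (List String)) → List (Option (List String))
  | [], _, mem => mem
  | c :: rest, i, mem =>
      pyA_loop substrings rest (i + 1)
        (if (mem.getD i none).isSome then pyA_inner substrings c i mem else mem)

def create_word_with_substrings (target_word : String) (substrings : List String) : Option (List String) :=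
  let t := target_word.toList
  let target_index := t.length
  -- mex_offset = len(max(substrings, key=len)); max of [] raises ValueError (outside Pre_)
  let mex_offset := ((PySem.List.max? substrings (fun s => PySem.Str.len s)).map (fun s => s.toList.length)).getD 0
  let memory := (List.replicate (target_index + mex_offset) (none : Option (List String))).set 0 (some [])
  (pyA_loop substrings t 0 memory).getD target_index none

-- ===== PORT B =====
-- inner loop 'for s in substrings: if s and s[0] == c: j = i + len(s); if j <= n: parent[j] = (i, s)'
def pyB_inner (substrings : List String) (n : Nat) (c : Char) (i : Nat)
    (par : List (Option (Nat × String))) : List (Option (Nat × String)) :=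
  substrings.foldl (fun p s =>
    if s.toList.head? == some c then
      if i + s.toList.length ≤ n then p.set (i + s.toList.length) (some (i, s)) else p
    else p) par

-- outer loop 'for i in range(n): if i == 0 or parent[i] is not None: …'
def pyB_loop (substrings : List String) (n : Nat) : List Char → Nat → List (Option (Nat × String)) → List (Option (Nat × String))
  | [], _, par => par
  | c :: rest, i, par =>
      pyB_loop substrings n rest (i + 1)
        (if i == 0 || (par.getD i none).isSome then pyB_inner substrings n c i par else par)

-- the 'while j:' reconstruction; fuel n suffices since back-pointers strictly decrease
def pyB_walk (par : List (Option (Nat × String))) : Nat → Nat → List String → List String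
  | 0, _, acc => acc
  | f + 1, j, acc =>
      if j = 0 then acc
      else
        match par.getD j none with
        | none => acc            -- unreachable on tables built by pyB_loop
        | some (i, s) => pyB_walk par f i (acc ++ [s])

def create_word_with_substrings_alt (target_word : String) (substrings : List String) : Option (List String) :=
  let t := target_word.toList
  let n := t.length
  let par := pyB_loop substrings n t 0 (List.replicate (n + 1) (none : Option (Nat × String)))
  if n ≠ 0 ∧ par.getD n none = none then none
  else some ((pyB_walk par n n []).reverse)

-- ===== PRECONDITION & SPEC =====
-- Pre_ excludes exactly the inputs on which A raises: substrings empty (max() → ValueError)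
-- or all substrings empty (memory too short → IndexError on memory[target_index] / memory[0]).
def Pre_create_word_with_substrings (target_word : String) (substrings : List String) : Prop :=
  ∃ s ∈ substrings, s ≠ ""
instance (target_word : String) (substrings : List String) : Decidable (Pre_create_word_with_substrings target_word substrings) := by unfold Pre_create_word_with_substrings; infer_instance

def pvWitness_create_word_with_substrings : String × List String := ("abc", ["ab", "c"])

def Spec_create_word_with_substrings (target_word : String) (substrings : List String) (out : Option (List String)) : Prop := out = create_word_with_substrings_alt target_word substrings
instance (target_word : String) (substrings : List String) (out : Option (List String)) : Decidable (Spec_create_word_with_substrings target_word substrings out) := by unfold Spec_create_word_with_substrings; infer_instance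

-- ===== CLAIM (what is proved, stated in full; the proofs are below) =====
def Claim_equal_create_word_with_substrings : Prop := ∀ (target_word : String) (substrings : List String), Dom_create_word_with_substrings target_word substrings → Pre_create_word_with_substrings target_word substrings → Spec_create_word_with_substrings target_word substrings (create_word_with_substrings target_word substrings)

-- ===== LEMMAS AND PROOFS =====

theorem pvGetD_set_ne {α : Type} (l : List (Option α)) (j q : Nat) (v : Option α) (h : q ≠ j) :
    (l.set j v).getD q none = l.getD q none := by
  simp [List.getD_eq_getElem?_getD, List.getElem?_set_ne (show j ≠ q from fun e => h e.symm)]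

theorem pvGetD_set_self {α : Type} (l : List (Option α)) (j : Nat) (v : Option α) (h : j < l.length) :
    (l.set j v).getD j none = v := by
  simp [List.getD_eq_getElem?_getD, h]

theorem pvGetD_replicate {α : Type} (k q : Nat) :
    (List.replicate k (none : Option α)).getD q none = none := by
  simp [List.getD_eq_getElem?_getD, List.getElem?_replicate]
  split <;> simp

theorem pvStarts (s : String) (c : Char) :
    PySem.Str.startswith s (String.ofList [c]) = true ↔ ∃ r, s.toList = c :: r := by
  rw [PySem.Str.startswith_eq, show (String.ofList [c]).toList = [c] by simp,
      PySem.Chars.startswith_iff]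
  constructor
  · rintro ⟨t, ht⟩; exact ⟨t, ht.symm⟩
  · rintro ⟨r, hr⟩; exact ⟨r, hr.symm⟩

theorem pvCondEq (s : String) (c : Char) :
    PySem.Str.startswith s (String.ofList [c]) = (s.toList.head? == some c) := by
  rw [Bool.eq_iff_iff, pvStarts]
  constructor
  · rintro ⟨r, hr⟩; rw [hr]; simp
  · intro h
    rcases hs : s.toList with _ | ⟨c0, r⟩
    · rw [hs] at h; simp at h
    · rw [hs] at h; simp at h; exact ⟨r, by rw [h]⟩

-- path reconstruction by back-pointers, fuel-indexed
def pvRb (par : List (Option (Nat × String))) : Nat → Nat → List String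
  | 0, _ => []
  | f + 1, j =>
      if j = 0 then []
      else
        match par.getD j none with
        | none => []
        | some (i, s) => pvRb par f i ++ [s]

theorem pvRb_succ (par : List (Option (Nat × String))) (f j i : Nat) (s : String)
    (h : par.getD j none = some (i, s)) (hj : j ≠ 0) :
    pvRb par (f + 1) j = pvRb par f i ++ [s] := by
  simp only [pvRb, if_neg hj, h]

theorem pvRb_fuel (par : List (Option (Nat × String)))
    (hc : ∀ j i s, par.getD j none = some (i, s) → i < j) :
    ∀ j f g, j ≤ f → j ≤ g → pvRb par f j = pvRb par g j := by
  intro j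
  induction j using Nat.strong_induction_on with
  | _ j ih =>
    intro f g hf hg
    rcases j with _ | k
    · have h0 : ∀ f, pvRb par f 0 = ([] : List String) := by
        intro f; cases f <;> simp [pvRb]
      rw [h0, h0]
    · obtain ⟨f', rfl⟩ : ∃ f', f = f' + 1 := ⟨f - 1, by omega⟩
      obtain ⟨g', rfl⟩ : ∃ g', g = g' + 1 := ⟨g - 1, by omega⟩
      simp only [pvRb]
      cases hpj : par.getD (k + 1) none with
      | none => simp [hpj]
      | some p =>
        rcases p with ⟨i, s⟩
        have hik := hc _ _ _ hpj
        simp only [hpj]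
        rw [ih i (by omega) f' g' (by omega) (by omega)]

theorem pvRb_frame (par : List (Option (Nat × String))) (jw : Nat) (v : Option (Nat × String))
    (hent : ∀ j' i' s', par.getD j' none = some (i', s') → i' ≠ jw) :
    ∀ f q, q ≠ jw → pvRb (par.set jw v) f q = pvRb par f q := by
  intro f
  induction f with
  | zero => intro q _; rfl
  | succ f ih =>
    intro q hq
    simp only [pvRb]
    by_cases h0 : q = 0
    · simp [h0]
    · rw [pvGetD_set_ne par jw q v hq]
      cases hpq : par.getD q none with
      | none => simp [hpq, h0]
      | some p =>
        rcases p with ⟨i, s⟩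
        simp only [hpq, if_neg h0]
        rw [ih i (hent q i s hpq)]

theorem pvWalk (par : List (Option (Nat × String)))
    (hc : ∀ j i s, par.getD j none = some (i, s) → i < j ∧ (i = 0 ∨ (par.getD i none).isSome)) :
    ∀ f j acc, j ≤ f → (j = 0 ∨ (par.getD j none).isSome) →
      pyB_walk par f j acc = acc ++ (pvRb par j j).reverse := by
  intro f
  induction f with
  | zero =>
    intro j acc hj _
    interval_cases j
    simp [pyB_walk, pvRb]
  | succ f ih =>
    intro j acc hj hreach
    by_cases h0 : j = 0
    · subst h0; simp [pyB_walk, pvRb]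
    · obtain ⟨p, hp⟩ : ∃ p, par.getD j none = some p := by
        rcases hreach with h | h
        · exact absurd h h0
        · exact Option.isSome_iff_exists.mp h
      rcases p with ⟨i, s⟩
      obtain ⟨hij, hreachi⟩ := hc _ _ _ hp
      obtain ⟨k, rfl⟩ : ∃ k, j = k + 1 := ⟨j - 1, by omega⟩
      simp only [pyB_walk, if_neg h0, hp]
      rw [ih i (acc ++ [s]) (by omega) hreachi]
      simp only [pvRb, if_neg h0, hp]
      rw [pvRb_fuel par (fun j i s h => (hc j i s h).1) i k i (by omega) (le_refl i)]
      simp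

-- the loop invariant: mem is A's memory, par is B's parent table, b bounds the
-- iteration numbers recorded so far in par
def pvInv (n mex b : Nat) (mem : List (Option (List String))) (par : List (Option (Nat × String))) : Prop :=
  mem.length = n + mex ∧ par.length = n + 1 ∧
  (∀ j i' s, par.getD j none = some (i', s) → i' < j ∧ i' < b ∧ (i' = 0 ∨ (par.getD i' none).isSome)) ∧
  (∀ q, q ≤ n → ((mem.getD q none).isSome ↔ (q = 0 ∨ (par.getD q none).isSome))) ∧
  (∀ q l, q ≤ n → mem.getD q none = some l → l = pvRb par q q)

theorem pvInv_mono (n mex b b' : Nat) (mem : List (Option (List String)))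
    (par : List (Option (Nat × String))) (h : pvInv n mex b mem par) (hb : b ≤ b') :
    pvInv n mex b' mem par := by
  obtain ⟨h1, h2, h3, h4, h5⟩ := h
  exact ⟨h1, h2, fun j i' s hj => ⟨(h3 j i' s hj).1, by have := (h3 j i' s hj).2.1; omega,
        (h3 j i' s hj).2.2⟩, h4, h5⟩

theorem pvStep (n mex i : Nat) (c : Char) (s : String)
    (mem : List (Option (List String))) (par : List (Option (Nat × String)))
    (hin : pvInv n mex (i + 1) mem par) (hi : i < n) (hmex1 : 1 ≤ mex)
    (hsmex : s.toList.length ≤ mex) (hsome : (mem.getD i none).isSome) :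
    pvInv n mex (i + 1)
      (if PySem.Str.startswith s (String.ofList [c]) then mem.set (i + s.toList.length) (some (((mem.getD i none).getD []) ++ [s])) else mem)
      (if s.toList.head? == some c then (if i + s.toList.length ≤ n then par.set (i + s.toList.length) (some (i, s)) else par) else par)
    ∧ (if PySem.Str.startswith s (String.ofList [c]) then mem.set (i + s.toList.length) (some (((mem.getD i none).getD []) ++ [s])) else mem).getD i none = mem.getD i none := by
  rw [pvCondEq]
  by_cases hcond : (s.toList.head? == some c) = true
  case neg => simp only [if_neg hcond]; exact ⟨hin, by simp⟩
  case pos =>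
    have hlen1 : 1 ≤ s.toList.length := by
      rcases hs : s.toList with _ | ⟨c0, r⟩
      · rw [hs] at hcond; simp at hcond
      · simp
    obtain ⟨l_i, hli⟩ : ∃ l, mem.getD i none = some l := Option.isSome_iff_exists.mp hsome
    obtain ⟨hmlen, hplen, hE, hC, hR⟩ := hin
    have hij0 : i < i + s.toList.length := by omega
    have hreach_i : i = 0 ∨ (par.getD i none).isSome :=
      (hC i (by omega)).mp (by rw [hli]; rfl)
    have hli_rb : l_i = pvRb par i i := hR i l_i (by omega) hli
    have hentfst : ∀ j' i' s', par.getD j' none = some (i', s') → i' ≠ i + s.toList.length := by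
      intro j' i' s' h
      have := (hE j' i' s' h).2.1
      omega
    simp only [if_pos hcond, hli, Option.getD_some]
    by_cases hjn : i + s.toList.length ≤ n
    · -- both sides write at position j0 = i + |s|
      rw [if_pos hjn]
      have hj0par : i + s.toList.length < par.length := by omega
      have hj0mem : i + s.toList.length < mem.length := by omega
      have hE' : ∀ j i' s', (par.set (i + s.toList.length) (some (i, s))).getD j none = some (i', s') →
          i' < j ∧ i' < i + 1 ∧ (i' = 0 ∨ ((par.set (i + s.toList.length) (some (i, s))).getD i' none).isSome) := by
        intro j i' s' hj
        by_cases hjj : j = i + s.toList.length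
        · subst hjj
          rw [pvGetD_set_self par _ _ hj0par] at hj
          injection hj with h'
          rw [Prod.mk.injEq] at h'
          obtain ⟨h1, h2⟩ := h'
          subst h1; subst h2
          refine ⟨hij0, by omega, ?_⟩
          rcases hreach_i with h | h
          · exact Or.inl h
          · right
            rw [pvGetD_set_ne par _ _ _ (by omega : i ≠ i + s.toList.length)]
            exact h
        · rw [pvGetD_set_ne par _ _ _ hjj] at hj
          obtain ⟨h1, h2, h3⟩ := hE j i' s' hj
          refine ⟨h1, h2, ?_⟩
          rcases h3 with h3 | h3
          · exact Or.inl h3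
          · right; rw [pvGetD_set_ne par _ _ _ (by omega : i' ≠ i + s.toList.length)]; exact h3
      have hdec' : ∀ j i' s', (par.set (i + s.toList.length) (some (i, s))).getD j none = some (i', s') → i' < j :=
        fun j i' s' h => (hE' j i' s' h).1
      have hrbj0 : pvRb (par.set (i + s.toList.length) (some (i, s))) (i + s.toList.length) (i + s.toList.length) = l_i ++ [s] := by
        obtain ⟨f', hf'⟩ : ∃ f', i + s.toList.length = f' + 1 := ⟨i + s.toList.length - 1, by omega⟩
        rw [hf'] at hj0par hentfst hdec' ⊢
        rw [pvRb_succ _ f' (f' + 1) i s (pvGetD_set_self par _ _ hj0par) (by omega)]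
        rw [pvRb_fuel _ hdec' i f' i (by omega) (le_refl i)]
        rw [pvRb_frame par (f' + 1) (some (i, s)) hentfst i i (by omega)]
        rw [← hli_rb]
      refine ⟨⟨by simp [hmlen], by simp [hplen], hE', ?_, ?_⟩, ?_⟩
      · intro q hq
        by_cases hqq : q = i + s.toList.length
        · subst hqq
          rw [pvGetD_set_self mem _ _ hj0mem, pvGetD_set_self par _ _ hj0par]
          simp
        · rw [pvGetD_set_ne mem _ _ _ hqq, pvGetD_set_ne par _ _ _ hqq]
          exact hC q hq
      · intro q l hq hl
        by_cases hqq : q = i + s.toList.length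
        · subst hqq
          rw [pvGetD_set_self mem _ _ hj0mem] at hl
          injection hl with hl
          rw [← hl, hrbj0]
        · rw [pvGetD_set_ne mem _ _ _ hqq] at hl
          rw [pvRb_frame par _ _ hentfst q q hqq]
          exact hR q l hq hl
      · rw [pvGetD_set_ne mem (i + s.toList.length) i _ (by omega)]; exact hli
    · -- j0 > n: A writes beyond position n, B skips; nothing tracked changes
      rw [if_neg hjn]
      refine ⟨⟨by simp [hmlen], hplen, hE, ?_, ?_⟩, ?_⟩
      · intro q hq
        rw [pvGetD_set_ne mem (i + s.toList.length) q _ (by omega)]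
        exact hC q hq
      · intro q l hq hl
        rw [pvGetD_set_ne mem (i + s.toList.length) q _ (by omega)] at hl
        exact hR q l hq hl
      · rw [pvGetD_set_ne mem (i + s.toList.length) i _ (by omega)]; exact hli

theorem pvInner (n mex : Nat) (hmex1 : 1 ≤ mex) (c : Char) (i : Nat) (hi : i < n) :
    ∀ (subs : List String) (mem : List (Option (List String))) (par : List (Option (Nat × String))),
      (∀ s ∈ subs, s.toList.length ≤ mex) →
      pvInv n mex (i + 1) mem par → (mem.getD i none).isSome →
      pvInv n mex (i + 1) (pyA_inner subs c i mem) (pyB_inner subs n c i par) ∧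
      (pyA_inner subs c i mem).getD i none = mem.getD i none := by
  intro subs
  induction subs with
  | nil => intro mem par _ hin _; exact ⟨hin, rfl⟩
  | cons s ss ih =>
    intro mem par hall hin hsome
    have hstep := pvStep n mex i c s mem par hin hi hmex1 (hall s (List.mem_cons_self)) hsome
    have hA : pyA_inner (s :: ss) c i mem = pyA_inner ss c i
        (if PySem.Str.startswith s (String.ofList [c]) then mem.set (i + s.toList.length) (some (((mem.getD i none).getD []) ++ [s])) else mem) := by
      simp only [pyA_inner, List.foldl_cons]
    have hB : pyB_inner (s :: ss) n c i par = pyB_inner ss n c i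
        (if s.toList.head? == some c then (if i + s.toList.length ≤ n then par.set (i + s.toList.length) (some (i, s)) else par) else par) := by
      simp only [pyB_inner, List.foldl_cons]
    rw [hA, hB]
    have h2 := ih _ _ (fun s' hs' => hall s' (List.mem_cons_of_mem s hs')) hstep.1
      (by rw [hstep.2]; exact hsome)
    exact ⟨h2.1, by rw [h2.2, hstep.2]⟩

theorem pvOuter (n mex : Nat) (hmex1 : 1 ≤ mex) (subs : List String)
    (hsubs : ∀ s ∈ subs, s.toList.length ≤ mex) :
    ∀ (rest : List Char) (i : Nat) (mem : List (Option (List String))) (par : List (Option (Nat × String))),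
      i + rest.length = n → pvInv n mex i mem par →
      pvInv n mex n (pyA_loop subs rest i mem) (pyB_loop subs n rest i par) := by
  intro rest
  induction rest with
  | nil =>
    intro i mem par hlen hin
    obtain rfl : i = n := by simpa using hlen
    exact hin
  | cons ch r ih =>
    intro i mem par hlen hin
    have hi : i < n := by
      simp only [List.length_cons] at hlen
      omega
    have hC := hin.2.2.2.1 i (by omega)
    simp only [pyA_loop, pyB_loop]
    by_cases hA : (mem.getD i none).isSome = true
    · have hBcond : (i == 0 || (par.getD i none).isSome) = true := by
        rcases hC.mp hA with h | h
        · simp [h]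
        · simp only [Bool.or_eq_true]; exact Or.inr h
      rw [if_pos hA, if_pos hBcond]
      have hinner := pvInner n mex hmex1 ch i hi subs mem par hsubs
        (pvInv_mono n mex i (i + 1) mem par hin (by omega)) hA
      exact ih (i + 1) _ _ (by simp only [List.length_cons] at hlen; omega) hinner.1
    · have hBcond : ¬ ((i == 0 || (par.getD i none).isSome) = true) := by
        intro h
        apply hA
        apply hC.mpr
        rcases Bool.or_eq_true_iff.mp h with h' | h'
        · exact Or.inl (by simpa using h')
        · exact Or.inr h'
      rw [if_neg hA, if_neg hBcond]
      exact ih (i + 1) mem par (by simp only [List.length_cons] at hlen; omega)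
        (pvInv_mono n mex i (i + 1) mem par hin (by omega))

-- ===== VERDICT (by name: the statement is the Claim_ definition above) =====
theorem pvInit (n mex : Nat) (hmex1 : 1 ≤ mex) :
    pvInv n mex 0 ((List.replicate (n + mex) (none : Option (List String))).set 0 (some []))
      (List.replicate (n + 1) (none : Option (Nat × String))) := by
  refine ⟨by simp, by simp, ?_, ?_, ?_⟩
  · intro j i' s hj
    rw [pvGetD_replicate] at hj
    cases hj
  · intro q hq
    by_cases hq0 : q = 0
    · subst hq0
      rw [pvGetD_set_self _ _ _ (by simp; omega)]
      simp
    · rw [pvGetD_set_ne _ _ _ _ hq0, pvGetD_replicate, pvGetD_replicate]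
      simp [hq0]
  · intro q l hq hl
    by_cases hq0 : q = 0
    · subst hq0
      rw [pvGetD_set_self _ _ _ (by simp; omega)] at hl
      injection hl with hl
      rw [← hl]
      rfl
    · rw [pvGetD_set_ne _ _ _ _ hq0, pvGetD_replicate] at hl
      cases hl

theorem create_word_with_substrings_spec : Claim_equal_create_word_with_substrings := by
  intro tw subs _ hpre
  unfold Spec_create_word_with_substrings
  obtain ⟨s0, hs0, hs0ne⟩ := hpre
  obtain ⟨m, hm⟩ : ∃ m, PySem.List.max? subs (fun s => PySem.Str.len s) = some m := by
    cases hmx : PySem.List.max? subs (fun s => PySem.Str.len s) with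
    | some m => exact ⟨m, rfl⟩
    | none => rw [PySem.List.max?_eq_none_iff] at hmx; subst hmx; cases hs0
  have hsmax : ∀ s ∈ subs, s.toList.length ≤ m.toList.length := by
    intro s hs
    have := PySem.List.max?_isMax hm s hs
    simp [PySem.Str.len_eq] at this
    exact_mod_cast this
  have hmex1 : 1 ≤ m.toList.length := by
    have h0 : s0.toList ≠ [] := fun h => hs0ne (by
      have := congrArg String.ofList h
      simpa using this)
    have h1 : 1 ≤ s0.toList.length := by
      cases hs : s0.toList with
      | nil => exact absurd hs h0
      | cons a l => simp
    exact le_trans h1 (hsmax s0 hs0)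
  unfold create_word_with_substrings create_word_with_substrings_alt
  simp only [hm, Option.map_some, Option.getD_some]
  have hfin := pvOuter tw.toList.length m.toList.length hmex1 subs hsmax tw.toList 0
    ((List.replicate (tw.toList.length + m.toList.length) (none : Option (List String))).set 0 (some []))
    (List.replicate (tw.toList.length + 1) (none : Option (Nat × String)))
    (by omega) (pvInit tw.toList.length m.toList.length hmex1)
  obtain ⟨hmlen, hplen, hE, hC, hR⟩ := hfin
  set memF := pyA_loop subs tw.toList 0
    ((List.replicate (tw.toList.length + m.toList.length) (none : Option (List String))).set 0 (some [])) with hmemF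
  set parF := pyB_loop subs tw.toList.length tw.toList 0
    (List.replicate (tw.toList.length + 1) (none : Option (Nat × String))) with hparF
  by_cases hcase : tw.toList.length ≠ 0 ∧ parF.getD tw.toList.length none = none
  · rw [if_pos hcase]
    have : ¬ (memF.getD tw.toList.length none).isSome = true := by
      intro h
      rcases (hC tw.toList.length (le_refl _)).mp h with h' | h'
      · exact hcase.1 h'
      · rw [hcase.2] at h'; cases h'
    cases hmv : memF.getD tw.toList.length none with
    | none => rfl
    | some l => rw [hmv] at this; exact absurd rfl this
  · rw [if_neg hcase]
    have hreach : tw.toList.length = 0 ∨ (parF.getD tw.toList.length none).isSome = true := by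
      by_cases h0 : tw.toList.length = 0
      · exact Or.inl h0
      · right
        cases hp : parF.getD tw.toList.length none with
        | none => exact absurd ⟨h0, hp⟩ hcase
        | some p => rfl
    have hsm : (memF.getD tw.toList.length none).isSome = true :=
      (hC tw.toList.length (le_refl _)).mpr hreach
    obtain ⟨l, hl⟩ : ∃ l, memF.getD tw.toList.length none = some l := Option.isSome_iff_exists.mp hsm
    have hlrb : l = pvRb parF tw.toList.length tw.toList.length := hR _ _ (le_refl _) hl
    rw [hl]
    rw [pvWalk parF (fun j i s h => ⟨(hE j i s h).1, (hE j i s h).2.2⟩) tw.toList.length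
      tw.toList.length [] (le_refl _) hreach]
    simp [hlrb]
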